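-- pv_equiv track=rewrite | github.com/takealittletime/CodingTest | 백준/Gold/1074. Z/Z.py | zTraversal
-- ===== SOURCE A (Python) =====
-- def zTraversal(n, startX, startY, r, c, value):
--     if n == 1:
--         # 기저 사례: 2x2 배열에서 위치를 찾아 값을 반환
--         if startX == r and startY == c:
--             return value
--         if startX == r and startY + 1 == c:
--             return value + 1
--         if startX + 1 == r and startY == c:
--             return value + 2
--         if startX + 1 == r and startY + 1 == c:
--             return value + 3
--
--     half = 2**(n-1)
--
--     # 1사분면 (좌상단)
--     if r < startX + half and c < startY + half:
--         return zTraversal(n-1, startX, startY, r, c, value)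
--     # 2사분면 (우상단)
--     elif r < startX + half and c >= startY + half:
--         return zTraversal(n-1, startX, startY + half, r, c, value + half**2)
--     # 3사분면 (좌하단)
--     elif r >= startX + half and c < startY + half:
--         return zTraversal(n-1, startX + half, startY, r, c, value + 2 * half**2)
--     # 4사분면 (우하단)
--     else:
--         return zTraversal(n-1, startX + half, startY + half, r, c, value + 3 * half**2)
-- ===== SOURCE B (Python) =====
-- def zTraversal(n, startX, startY, r, c, value):
--     # Bit method: the Z-order index is the interleaving of the bits of the
--     # relative coordinates; no recursion, no coordinate/value updates.
--     dr = r - startX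
--     dc = c - startY
--     if n < 1 or not (0 <= dr < 2**n and 0 <= dc < 2**n):
--         raise ValueError("position outside the 2^n x 2^n grid")
--     res = value
--     for k in range(n - 1, -1, -1):
--         res += (2 * (dr // 2**k % 2) + dc // 2**k % 2) * 4**k
--     return res
-- ===== Notes on version B (the rewrite author's own statement) =====
-- stated objective: alternative
-- what changed: Replaces A's recursive quadrant descent (updating startX/startY/value per level) by a single non-recursive loop that extracts the two coordinate bits of each level and sums the bit-interleaved (Morton) terms directly from r-startX and c-startY.
import Mathlib
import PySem

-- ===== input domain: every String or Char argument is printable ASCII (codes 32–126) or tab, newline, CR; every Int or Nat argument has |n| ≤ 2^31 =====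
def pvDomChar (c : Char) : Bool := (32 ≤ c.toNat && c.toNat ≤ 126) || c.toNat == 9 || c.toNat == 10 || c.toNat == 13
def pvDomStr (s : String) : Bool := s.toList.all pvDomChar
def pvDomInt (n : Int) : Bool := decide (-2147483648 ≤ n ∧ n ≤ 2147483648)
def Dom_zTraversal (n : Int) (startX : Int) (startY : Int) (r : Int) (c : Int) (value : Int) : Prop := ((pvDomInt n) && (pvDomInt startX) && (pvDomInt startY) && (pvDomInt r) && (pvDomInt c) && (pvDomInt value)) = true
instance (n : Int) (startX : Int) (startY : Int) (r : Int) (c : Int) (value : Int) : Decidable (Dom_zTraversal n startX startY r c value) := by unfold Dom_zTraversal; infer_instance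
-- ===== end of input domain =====

-- B replaces A's recursive quadrant descent by a single loop extracting the two
-- coordinate bits of each level and summing bit-interleaved (Morton) terms;
-- equivalence is about the return value on in-range positions (Pre_ below).

-- ===== PORT A =====
-- Literal transliteration of A's recursion, driven by a fuel counter n.toNat
-- (inside Pre_ the recursion bottoms out at n = 1 before fuel runs out; for
-- n ≤ 0 or out-of-range positions Python recurses forever (RecursionError),
-- which Pre_ excludes, so the fuel-0 value is never relevant to the claim).
def zTraversalGo : Nat → Int → Int → Int → Int → Int → Int → Int
  | 0, _, _, _, _, _, value => value
  | fuel+1, n, startX, startY, r, c, value =>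
    if n = 1 ∧ startX = r ∧ startY = c then value
    else if n = 1 ∧ startX = r ∧ startY + 1 = c then value + 1
    else if n = 1 ∧ startX + 1 = r ∧ startY = c then value + 2
    else if n = 1 ∧ startX + 1 = r ∧ startY + 1 = c then value + 3
    else
      -- Python: half = 2**(n-1); for n ≤ 0 that is a float (outside Pre_)
      let half : Int := 2 ^ (n - 1).toNat
      if r < startX + half ∧ c < startY + half then
        zTraversalGo fuel (n-1) startX startY r c value
      else if r < startX + half ∧ c ≥ startY + half then
        zTraversalGo fuel (n-1) startX (startY + half) r c (value + half^2)
      else if r ≥ startX + half ∧ c < startY + half then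
        zTraversalGo fuel (n-1) (startX + half) startY r c (value + 2 * half^2)
      else
        zTraversalGo fuel (n-1) (startX + half) (startY + half) r c (value + 3 * half^2)

def zTraversal (n : Int) (startX : Int) (startY : Int) (r : Int) (c : Int) (value : Int) : Int :=
  zTraversalGo n.toNat n startX startY r c value

-- ===== PORT B =====
-- Source B: dr//2**k and 4**k with k ≥ 0 from range(n-1,-1,-1); 2**k is ported as
-- 2 ^ k.toNat (exact: every k produced by this range is nonnegative); on the
-- guard branch Source B raises ValueError (outside Pre_), the port returns value.
def zTraversal_alt (n : Int) (startX : Int) (startY : Int) (r : Int) (c : Int) (value : Int) : Int :=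
  let dr := r - startX
  let dc := c - startY
  if n < 1 ∨ ¬ (0 ≤ dr ∧ dr < 2 ^ n.toNat ∧ 0 ≤ dc ∧ dc < 2 ^ n.toNat) then value
  else (PySem.List.pyRange (n - 1) (-1) (-1)).foldl
    (fun res k =>
      res + (2 * (PySem.Int.mod (PySem.Int.floordiv dr (2 ^ k.toNat)) 2)
               + PySem.Int.mod (PySem.Int.floordiv dc (2 ^ k.toNat)) 2) * 4 ^ k.toNat)
    value

-- ===== PRECONDITION & SPEC =====
-- Pre_ = exactly the inputs where Python A returns: n ≥ 1 and (r,c) inside the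
-- 2^n×2^n block at (startX,startY); on every other input A recurses without a
-- base case and raises (RecursionError; for n < 1, 2**(n-1) is a float first).
def Pre_zTraversal (n : Int) (startX : Int) (startY : Int) (r : Int) (c : Int) (value : Int) : Prop :=
  1 ≤ n ∧ startX ≤ r ∧ r < startX + 2 ^ n.toNat ∧ startY ≤ c ∧ c < startY + 2 ^ n.toNat
instance (n : Int) (startX : Int) (startY : Int) (r : Int) (c : Int) (value : Int) : Decidable (Pre_zTraversal n startX startY r c value) := by unfold Pre_zTraversal; infer_instance

def pvWitness_zTraversal : Int × Int × Int × Int × Int × Int := (2, 0, 0, 1, 2, 0)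

def Spec_zTraversal (n : Int) (startX : Int) (startY : Int) (r : Int) (c : Int) (value : Int) (out : Int) : Prop := out = zTraversal_alt n startX startY r c value
instance (n : Int) (startX : Int) (startY : Int) (r : Int) (c : Int) (value : Int) (out : Int) : Decidable (Spec_zTraversal n startX startY r c value out) := by unfold Spec_zTraversal; infer_instance

-- ===== CLAIM (what is proved, stated in full; the proofs are below) =====
def Claim_equal_zTraversal : Prop := ∀ (n : Int) (startX : Int) (startY : Int) (r : Int) (c : Int) (value : Int), Dom_zTraversal n startX startY r c value → Pre_zTraversal n startX startY r c value → Spec_zTraversal n startX startY r c value (zTraversal n startX startY r c value)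

-- ===== LEMMAS AND PROOFS =====

-- the k-th summand of B's loop
def zTerm (dr dc : Int) (k : Nat) : Int :=
  (2 * (PySem.Int.mod (PySem.Int.floordiv dr (2 ^ k)) 2)
     + PySem.Int.mod (PySem.Int.floordiv dc (2 ^ k)) 2) * 4 ^ k

-- sum of zTerm over k < N
def zSum (dr dc : Int) : Nat → Int
  | 0 => 0
  | N+1 => zTerm dr dc N + zSum dr dc N

theorem zTerm_eq (dr dc : Int) (k : Nat) :
    zTerm dr dc k = (2 * (dr / 2 ^ k % 2) + dc / 2 ^ k % 2) * 4 ^ k := by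
  have h : (0:Int) < 2 ^ k := by positivity
  simp [zTerm]

-- adding a multiple of 2^M to each coordinate does not change levels k < M
theorem zTerm_shift (x y bx by' : Int) (M k : Nat) (hk : k < M) :
    zTerm (x + bx * 2 ^ M) (y + by' * 2 ^ M) k = zTerm x y k := by
  rw [zTerm_eq, zTerm_eq]
  have h2 : (2:Int) ^ k ≠ 0 := by positivity
  have hM : ∀ b : Int, b * 2 ^ M = (b * 2 ^ (M - k - 1) * 2) * 2 ^ k := by
    intro b
    have hp : (2:Int) ^ M = 2 ^ (M - k - 1) * 2 * 2 ^ k := by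
      rw [← pow_succ, ← pow_add]
      congr 1
      omega
    calc b * 2 ^ M = b * (2 ^ (M - k - 1) * 2 * 2 ^ k) := by rw [hp]
    _ = (b * 2 ^ (M - k - 1) * 2) * 2 ^ k := by ring
  rw [hM bx, hM by', Int.add_mul_ediv_right _ _ h2, Int.add_mul_ediv_right _ _ h2]
  congr 1
  generalize x / 2 ^ k = X
  generalize y / 2 ^ k = Y
  omega

theorem zSum_shift (x y bx by' : Int) (M : Nat) :
    ∀ K, K ≤ M → zSum (x + bx * 2 ^ M) (y + by' * 2 ^ M) K = zSum x y K := by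
  intro K
  induction K with
  | zero => intro _; rfl
  | succ K ih =>
    intro h
    simp [zSum, zTerm_shift x y bx by' M K (by omega), ih (by omega)]

-- top level: if 0 ≤ x < 2^(M+1) then its bit at level M is x / 2^M
theorem zTerm_top (dr dc : Int) (M : Nat) (br bc : Int)
    (hbr : br = 0 ∨ br = 1) (hbc : bc = 0 ∨ bc = 1)
    (dr' dc' : Int) (hdr : dr = dr' + br * 2 ^ M) (hdc : dc = dc' + bc * 2 ^ M)
    (hr0 : 0 ≤ dr') (hr1 : dr' < 2 ^ M) (hc0 : 0 ≤ dc') (hc1 : dc' < 2 ^ M) :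
    zTerm dr dc M = (2 * br + bc) * 4 ^ M := by
  rw [zTerm_eq]
  have hdiv : ∀ (x b : Int), b = 0 ∨ b = 1 → 0 ≤ x → x < 2 ^ M →
      (x + b * 2 ^ M) / 2 ^ M % 2 = b := by
    intro x b hb hx0 hx1
    have h2 : (2:Int) ^ M ≠ 0 := by positivity
    rw [Int.add_mul_ediv_right _ _ h2, Int.ediv_eq_zero_of_lt hx0 hx1]
    rcases hb with h | h <;> simp [h]
  rw [hdr, hdc, hdiv _ _ hbr hr0 hr1, hdiv _ _ hbc hc0 hc1]

-- ===== A side: the fuel recursion computes value + zSum =====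
theorem goA_eq : ∀ (N fuel : Nat) (sx sy r c v : Int), N < fuel →
    0 ≤ r - sx → r - sx < 2 ^ (N + 1) → 0 ≤ c - sy → c - sy < 2 ^ (N + 1) →
    zTraversalGo fuel ((N : Int) + 1) sx sy r c v = v + zSum (r - sx) (c - sy) (N + 1) := by
  intro N
  induction N with
  | zero =>
    intro fuel sx sy r c v hf h1 h2 h3 h4
    obtain ⟨f, rfl⟩ : ∃ f, fuel = f + 1 := ⟨fuel - 1, by omega⟩
    have hr : r = sx ∨ r = sx + 1 := by omega
    have hc : c = sy ∨ c = sy + 1 := by omega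
    rcases hr with rfl | rfl <;> rcases hc with rfl | rfl <;>
      simp [zTraversalGo, zSum, zTerm_eq]
  | succ N ih =>
    intro fuel sx sy r c v hf h1 h2 h3 h4
    rw [show ((N + 1 : Nat) : Int) = (N : Int) + 1 from by push_cast; ring]
    rw [show (2:Int) ^ (N + 1 + 1) = 2 ^ (N + 1) * 2 from pow_succ 2 (N + 1)] at h2 h4
    obtain ⟨f, rfl⟩ : ∃ f, fuel = f + 1 := ⟨fuel - 1, by omega⟩
    have hn1 : ¬ ((N : Int) + 1 + 1 = 1) := by omega
    rw [zTraversalGo]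
    rw [if_neg (fun h => hn1 h.1), if_neg (fun h => hn1 h.1),
        if_neg (fun h => hn1 h.1), if_neg (fun h => hn1 h.1)]
    simp only [show ((N : Int) + 1 + 1 - 1) = (N : Int) + 1 from by ring,
               show (((N : Int) + 1).toNat) = N + 1 from by omega]
    have hpos : (0:Int) < 2 ^ (N + 1) := by positivity
    by_cases hbr : r - sx < 2 ^ (N + 1) <;> by_cases hbc : c - sy < 2 ^ (N + 1)
    · -- quadrant 1
      rw [if_pos ⟨by omega, by omega⟩]
      rw [ih f sx sy r c v (by omega) h1 hbr h3 hbc]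
      have : zSum (r - sx) (c - sy) (N + 1 + 1)
           = zTerm (r - sx) (c - sy) (N + 1) + zSum (r - sx) (c - sy) (N + 1) := rfl
      rw [this, zTerm_top (r - sx) (c - sy) (N + 1) 0 0 (Or.inl rfl) (Or.inl rfl)
            (r - sx) (c - sy) (by ring) (by ring) h1 hbr h3 hbc]
      ring
    · -- quadrant 2
      rw [if_neg (by omega), if_pos ⟨by omega, by omega⟩]
      rw [ih f sx (sy + 2 ^ (N + 1)) r c _ (by omega) h1 hbr (by omega) (by omega)]
      have hd : c - (sy + 2 ^ (N + 1)) = c - sy - 2 ^ (N + 1) := by ring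
      rw [hd]
      have hS : zSum (r - sx) (c - sy) (N + 1)
              = zSum (r - sx) (c - sy - 2 ^ (N + 1)) (N + 1) := by
        have := zSum_shift (r - sx) (c - sy - 2 ^ (N + 1)) 0 1 (N + 1) (N + 1) le_rfl
        simpa using this
      have hT := zTerm_top (r - sx) (c - sy) (N + 1) 0 1 (Or.inl rfl) (Or.inr rfl)
            (r - sx) (c - sy - 2 ^ (N + 1)) (by ring) (by ring) h1 hbr (by omega) (by omega)
      show v + ((2:Int) ^ (N + 1)) ^ 2 + zSum (r - sx) (c - sy - 2 ^ (N + 1)) (N + 1)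
         = v + zSum (r - sx) (c - sy) (N + 1 + 1)
      have hE : zSum (r - sx) (c - sy) (N + 1 + 1)
           = zTerm (r - sx) (c - sy) (N + 1) + zSum (r - sx) (c - sy) (N + 1) := rfl
      rw [hE, hT, hS]
      have h4eq : (4:Int) ^ (N + 1) = ((2:Int) ^ (N + 1)) ^ 2 := by
        rw [← pow_mul, mul_comm, pow_mul]; norm_num
      rw [h4eq]; ring
    · -- quadrant 3
      rw [if_neg (by omega), if_neg (by omega), if_pos ⟨by omega, by omega⟩]
      rw [ih f (sx + 2 ^ (N + 1)) sy r c _ (by omega) (by omega) (by omega) h3 hbc]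
      have hd : r - (sx + 2 ^ (N + 1)) = r - sx - 2 ^ (N + 1) := by ring
      rw [hd]
      have hS : zSum (r - sx) (c - sy) (N + 1)
              = zSum (r - sx - 2 ^ (N + 1)) (c - sy) (N + 1) := by
        have := zSum_shift (r - sx - 2 ^ (N + 1)) (c - sy) 1 0 (N + 1) (N + 1) le_rfl
        simpa using this
      have hT := zTerm_top (r - sx) (c - sy) (N + 1) 1 0 (Or.inr rfl) (Or.inl rfl)
            (r - sx - 2 ^ (N + 1)) (c - sy) (by ring) (by ring) (by omega) (by omega) h3 hbc
      show v + 2 * ((2:Int) ^ (N + 1)) ^ 2 + zSum (r - sx - 2 ^ (N + 1)) (c - sy) (N + 1)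
         = v + zSum (r - sx) (c - sy) (N + 1 + 1)
      have hE : zSum (r - sx) (c - sy) (N + 1 + 1)
           = zTerm (r - sx) (c - sy) (N + 1) + zSum (r - sx) (c - sy) (N + 1) := rfl
      rw [hE, hT, hS]
      have h4eq : (4:Int) ^ (N + 1) = ((2:Int) ^ (N + 1)) ^ 2 := by
        rw [← pow_mul, mul_comm, pow_mul]; norm_num
      rw [h4eq]; ring
    · -- quadrant 4
      rw [if_neg (by omega), if_neg (by omega), if_neg (by omega)]
      rw [ih f (sx + 2 ^ (N + 1)) (sy + 2 ^ (N + 1)) r c _ (by omega) (by omega) (by omega)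
            (by omega) (by omega)]
      have hdr : r - (sx + 2 ^ (N + 1)) = r - sx - 2 ^ (N + 1) := by ring
      have hdc : c - (sy + 2 ^ (N + 1)) = c - sy - 2 ^ (N + 1) := by ring
      rw [hdr, hdc]
      have hS : zSum (r - sx) (c - sy) (N + 1)
              = zSum (r - sx - 2 ^ (N + 1)) (c - sy - 2 ^ (N + 1)) (N + 1) := by
        have := zSum_shift (r - sx - 2 ^ (N + 1)) (c - sy - 2 ^ (N + 1)) 1 1 (N + 1) (N + 1) le_rfl
        simpa using this
      have hT := zTerm_top (r - sx) (c - sy) (N + 1) 1 1 (Or.inr rfl) (Or.inr rfl)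
            (r - sx - 2 ^ (N + 1)) (c - sy - 2 ^ (N + 1)) (by ring) (by ring)
            (by omega) (by omega) (by omega) (by omega)
      show v + 3 * ((2:Int) ^ (N + 1)) ^ 2 + zSum (r - sx - 2 ^ (N + 1)) (c - sy - 2 ^ (N + 1)) (N + 1)
         = v + zSum (r - sx) (c - sy) (N + 1 + 1)
      have hE : zSum (r - sx) (c - sy) (N + 1 + 1)
           = zTerm (r - sx) (c - sy) (N + 1) + zSum (r - sx) (c - sy) (N + 1) := rfl
      rw [hE, hT, hS]
      have h4eq : (4:Int) ^ (N + 1) = ((2:Int) ^ (N + 1)) ^ 2 := by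
        rw [← pow_mul, mul_comm, pow_mul]; norm_num
      rw [h4eq]; ring

-- ===== B side: the countdown fold computes value + zSum =====
theorem foldB_eq (dr dc : Int) : ∀ (M : Nat) (v : Int),
    (PySem.List.pyRange ((M : Int) - 1) (-1) (-1)).foldl
      (fun res k =>
        res + (2 * (PySem.Int.mod (PySem.Int.floordiv dr (2 ^ k.toNat)) 2)
                 + PySem.Int.mod (PySem.Int.floordiv dc (2 ^ k.toNat)) 2) * 4 ^ k.toNat)
      v = v + zSum dr dc M := by
  intro M
  induction M with
  | zero =>
    intro v
    rw [PySem.List.pyRange_neg_one_eq_nil (by norm_num)]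
    simp [zSum]
  | succ M ih =>
    intro v
    rw [show ((M + 1 : Nat) : Int) = (M : Int) + 1 from by push_cast; ring]
    rw [PySem.List.pyRange_neg_one_cons (by omega)]
    simp only [List.foldl_cons]
    have hcast : ((M : Int) + 1 - 1 - 1) = (M : Int) - 1 := by ring
    have htn : (((M : Int) + 1 - 1).toNat) = M := by omega
    rw [hcast, htn, ih]
    show v + zTerm dr dc M + zSum dr dc M = v + zSum dr dc (M + 1)
    show v + zTerm dr dc M + zSum dr dc M = v + (zTerm dr dc M + zSum dr dc M)
    ring

-- ===== VERDICT (by name: the statement is the Claim_ definition above) =====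
theorem zTraversal_spec : Claim_equal_zTraversal := by
  intro n sx sy r c v _ hpre
  obtain ⟨h1, h3, h4, h5, h6⟩ := hpre
  obtain ⟨N, hN⟩ : ∃ N : Nat, n = (N : Int) + 1 := ⟨(n - 1).toNat, by omega⟩
  subst hN
  have htn : ((N : Int) + 1).toNat = N + 1 := by omega
  unfold Spec_zTraversal zTraversal zTraversal_alt
  rw [htn] at h4 h6 ⊢
  rw [if_neg (by push Not; exact ⟨by omega, by omega, by omega, by omega, by omega⟩)]
  rw [goA_eq N (N + 1) sx sy r c v (by omega) (by omega) (by omega) (by omega) (by omega)]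
  have := foldB_eq (r - sx) (c - sy) (N + 1) v
  simp only [Nat.cast_add, Nat.cast_one] at this
  rw [this]
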